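-- pv_equiv track=rewrite | github.com/egorOsAndr/test_task | task1/task1.py | func
-- ===== SOURCE A (Python) =====
-- def func(n: int, m: int) -> str:
--     arr: list[int] = [i + 1 for i in range(n)]
--     answer: list = []
--     index: int = 0
--     while True:
--         answer.append(arr[index])
--         index = (index - 1 + m) % n
--         if arr[index] == 1:
--             break
--     answer_str: list[str] = map(lambda x: str(x), answer)
--     return ''.join(answer_str)
-- ===== SOURCE B (Python) =====
-- def func(n: int, m: int) -> str:
--     # cycle length is n // gcd(n, m-1); emit digits by direct multiplicative indexing
--     a, b = n, (m - 1) % n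
--     while b:
--         a, b = b, a % b
--     count = n // a
--     return ''.join(str(k * (m - 1) % n + 1) for k in range(count))
-- ===== Notes on version B (the rewrite author's own statement) =====
-- stated objective: faster
-- what changed: Replaces A's step-until-back-at-start simulation loop (which builds an n-element array and walks the index sequence one modular step at a time, testing arr[index]==1 to stop) by computing the cycle length up front as n // gcd(n, m-1) and emitting each digit directly from the closed-form index (k*(m-1)) % n.
import Mathlib
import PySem

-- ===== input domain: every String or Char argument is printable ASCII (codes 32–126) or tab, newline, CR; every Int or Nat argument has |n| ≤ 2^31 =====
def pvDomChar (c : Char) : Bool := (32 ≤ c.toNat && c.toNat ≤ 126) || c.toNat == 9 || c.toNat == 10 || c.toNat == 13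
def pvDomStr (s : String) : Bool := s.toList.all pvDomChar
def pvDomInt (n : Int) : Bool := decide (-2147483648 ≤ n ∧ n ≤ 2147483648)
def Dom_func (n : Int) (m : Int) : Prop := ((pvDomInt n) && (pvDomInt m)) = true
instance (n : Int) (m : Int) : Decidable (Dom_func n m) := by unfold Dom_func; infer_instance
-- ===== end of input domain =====

-- B replaces A's step-until-back-at-start loop by a precomputed cycle length n // gcd(n, m-1)
-- and direct closed-form indexing (k*(m-1)) % n; alternative decomposition, return value only.

-- ===== PORT A =====
-- the while-True loop of A; fuel is a totality guard only (n iterations always suffice)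
def funcLoop (arr : List Int) (n m : Int) (index : Int) (acc : List Int) : Nat → List Int
  | 0 => acc
  | fuel + 1 =>
    let acc' := acc ++ [(PySem.List.pyGet? arr index).getD 0]
    let index' := PySem.Int.mod (index - 1 + m) n
    if (PySem.List.pyGet? arr index').getD 0 = 1 then acc'
    else funcLoop arr n m index' acc' fuel

def func (n : Int) (m : Int) : String :=
  let arr : List Int := (PySem.List.pyRange 0 n 1).map (fun i => i + 1)
  let answer : List Int := funcLoop arr n m 0 [] (n.toNat + 1)
  PySem.Str.join "" (answer.map PySem.Int.toStr)

-- ===== PORT B =====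
-- Source B's hand-written Euclid loop (fuel is a totality guard; b strictly decreases)
def gcdLoop (a b : Int) : Nat → Int
  | 0 => a
  | fuel + 1 => if b = 0 then a else gcdLoop b (PySem.Int.mod a b) fuel

def func_alt (n : Int) (m : Int) : String :=
  let b0 := PySem.Int.mod (m - 1) n
  let g := gcdLoop n b0 (b0.natAbs + 1)
  let count := PySem.Int.floordiv n g
  PySem.Str.join "" ((PySem.List.pyRange 0 count 1).map
    (fun k => PySem.Int.toStr (PySem.Int.mod (k * (m - 1)) n + 1)))

-- ===== PRECONDITION & SPEC =====
-- Pre_ excludes n ≤ 0, where A raises IndexError (arr[0] on an empty list)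
def Pre_func (n : Int) (m : Int) : Prop := 1 ≤ n
instance (n : Int) (m : Int) : Decidable (Pre_func n m) := by unfold Pre_func; infer_instance
def pvWitness_func : Int × Int := (6, 3)

def Spec_func (n : Int) (m : Int) (out : String) : Prop := out = func_alt n m
instance (n : Int) (m : Int) (out : String) : Decidable (Spec_func n m out) := by unfold Spec_func; infer_instance

-- ===== CLAIM (what is proved, stated in full; the proofs are below) =====
def Claim_equal_func : Prop := ∀ (n : Int) (m : Int), Dom_func n m → Pre_func n m → Spec_func n m (func n m)

-- ===== LEMMAS AND PROOFS =====

lemma emod_addl (A B n : Int) : (A % n + B) % n = (A + B) % n := by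
  rw [Int.add_emod, Int.emod_emod_of_dvd _ (dvd_refl n), ← Int.add_emod]

lemma emod_addr (A B n : Int) : (A + B % n) % n = (A + B) % n := by
  rw [Int.add_emod, Int.emod_emod_of_dvd _ (dvd_refl n), ← Int.add_emod]

-- Euclid's loop computes Int.gcd
lemma gcdLoop_eq (fuel : Nat) : ∀ (a b : Int), 0 < a → 0 ≤ b → b.toNat < fuel →
    gcdLoop a b fuel = (Int.gcd a b : Int) := by
  induction fuel with
  | zero => intro a b _ _ h; omega
  | succ fuel ih =>
    intro a b ha hb hfuel
    by_cases h0 : b = 0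
    · simp [gcdLoop, h0, abs_of_pos ha]
    · have hbpos : 0 < b := lt_of_le_of_ne hb (Ne.symm h0)
      have hmod : PySem.Int.mod a b = a % b := PySem.Int.mod_eq_emod_of_pos hbpos
      have h1 : 0 ≤ a % b := Int.emod_nonneg a h0
      have h2 : a % b < b := Int.emod_lt_of_pos a hbpos
      rw [gcdLoop, if_neg h0, hmod, ih b (a % b) hbpos h1 (by omega)]
      congr 1
      symm
      conv_lhs => rw [← Int.emod_add_mul_ediv a b]
      rw [Int.gcd_comm, Int.gcd_add_mul_left_right]

-- Nat divisibility: N ∣ t*D ↔ (N / gcd N D) ∣ t  (N > 0)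
lemma dvd_mul_iff_cycle (N D : Nat) (hN : 0 < N) (t : Nat) :
    N ∣ t * D ↔ (N / Nat.gcd N D) ∣ t := by
  set G := Nat.gcd N D with hG
  have hGpos : 0 < G := Nat.gcd_pos_of_pos_left D hN
  have hNG : N / G * G = N := Nat.div_mul_cancel (Nat.gcd_dvd_left N D)
  have hDG : D / G * G = D := Nat.div_mul_cancel (Nat.gcd_dvd_right N D)
  constructor
  · intro h
    have h' : N / G * G ∣ t * (D / G) * G := by
      rw [hNG, mul_assoc, hDG]; exact h
    have h'' : N / G ∣ t * (D / G) := (mul_dvd_mul_iff_right (by omega : (G:Nat) ≠ 0)).mp h'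
    exact (Nat.coprime_div_gcd_div_gcd hGpos).dvd_of_dvd_mul_right h''
  · rintro ⟨k, hk⟩
    refine ⟨k * (D / G), ?_⟩
    calc t * D = (N / G * k) * (D / G * G) := by rw [hk, hDG]
      _ = (N / G * G) * (k * (D / G)) := by ring
      _ = N * (k * (D / G)) := by rw [hNG]

-- the k-th index the loop visits
def idxI (n d : Int) (k : Nat) : Int := ((k : Int) * d) % n

lemma idxI_bounds (n d : Int) (hn : 0 < n) (k : Nat) : 0 ≤ idxI n d k ∧ idxI n d k < n :=
  ⟨Int.emod_nonneg _ (by omega), Int.emod_lt_of_pos _ hn⟩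

-- one step of the loop advances idxI
lemma idxI_step (n m : Int) (hn : 0 < n) (k : Nat) :
    PySem.Int.mod (idxI n (PySem.Int.mod (m - 1) n) k - 1 + m) n
      = idxI n (PySem.Int.mod (m - 1) n) (k + 1) := by
  have hmod : ∀ a : Int, PySem.Int.mod a n = a % n := fun a => PySem.Int.mod_eq_emod_of_pos hn
  simp only [hmod, idxI]
  have e1 : (k:Int) * ((m-1) % n) % n - 1 + m = (k:Int) * ((m-1) % n) % n + (m - 1) := by ring
  rw [e1, emod_addl, ← emod_addr ((k:Int) * ((m-1) % n)) (m-1) n,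
      show (k:Int) * ((m-1) % n) + (m-1) % n = ((k:Int) + 1) * ((m-1) % n) by ring]
  push_cast
  rfl

-- value of arr at an in-range index
lemma arr_val (n i : Int) (h0 : 0 ≤ i) (h1 : i < n) :
    ((PySem.List.pyGet? ((PySem.List.pyRange 0 n 1).map (fun i => i + 1)) i).getD 0) = i + 1 := by
  rw [PySem.List.pyGet?_of_nonneg _ h0]
  have hn : n = ((n.toNat : Nat) : Int) := by omega
  rw [hn, PySem.List.getElem?_map_pyRange_zero (fun i => i + 1) n.toNat i.toNat (by omega)]
  simp
  omega

-- idxI hits 0 exactly on multiples of the cycle length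
lemma idxI_zero_iff (n m : Int) (hn : 0 < n) (t : Nat) :
    idxI n (PySem.Int.mod (m - 1) n) t = 0 ↔
      (n.toNat / Nat.gcd n.toNat (PySem.Int.mod (m - 1) n).toNat) ∣ t := by
  set d := PySem.Int.mod (m - 1) n with hd
  have hd0 : 0 ≤ d := by rw [hd, PySem.Int.mod_eq_emod_of_pos hn]; exact Int.emod_nonneg _ (by omega)
  have hdc : d = ((d.toNat : Nat) : Int) := by omega
  have hnc : n = ((n.toNat : Nat) : Int) := by omega
  rw [← dvd_mul_iff_cycle n.toNat d.toNat (by omega) t]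
  unfold idxI
  rw [PySem.Int.emod_eq_zero_iff_dvd]
  constructor
  · intro h
    rw [hdc, hnc] at h
    exact_mod_cast h
  · intro h
    rw [hdc, hnc]
    exact_mod_cast h

lemma emod_mulr (A B n : Int) : (A * (B % n)) % n = (A * B) % n := by
  rw [Int.mul_emod, Int.emod_emod_of_dvd _ (dvd_refl n), ← Int.mul_emod]

-- the loop, started at the k-th index, emits exactly the remaining c - k values
lemma funcLoop_spec (n m : Int) (hn : 0 < n) (fuel : Nat) :
    ∀ (k : Nat) (acc : List Int),
      k < n.toNat / Nat.gcd n.toNat (PySem.Int.mod (m - 1) n).toNat →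
      n.toNat / Nat.gcd n.toNat (PySem.Int.mod (m - 1) n).toNat - k ≤ fuel →
      funcLoop ((PySem.List.pyRange 0 n 1).map (fun i => i + 1)) n m
          (idxI n (PySem.Int.mod (m - 1) n) k) acc fuel
        = acc ++ (List.range (n.toNat / Nat.gcd n.toNat (PySem.Int.mod (m - 1) n).toNat - k)).map
            (fun j => idxI n (PySem.Int.mod (m - 1) n) (k + j) + 1) := by
  induction fuel with
  | zero => intro k acc hk hf; omega
  | succ fuel ih =>
    intro k acc hk hf
    set d := PySem.Int.mod (m - 1) n with hd
    set c := n.toNat / Nat.gcd n.toNat d.toNat with hc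
    rw [funcLoop]
    obtain ⟨hb0, hb1⟩ := idxI_bounds n d hn k
    obtain ⟨hb0', hb1'⟩ := idxI_bounds n d hn (k + 1)
    rw [arr_val n _ hb0 hb1, idxI_step n m hn k, arr_val n _ hb0' hb1']
    have hiff : idxI n d (k + 1) + 1 = 1 ↔ c ∣ (k + 1) := by
      rw [show (idxI n d (k + 1) + 1 = 1) ↔ (idxI n d (k + 1) = 0) by omega]
      exact idxI_zero_iff n m hn (k + 1)
    by_cases hkc : k + 1 = c
    · rw [if_pos (hiff.mpr (hkc ▸ dvd_refl c))]
      have : c - k = 1 := by omega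
      rw [this]
      simp
    · have hklt : k + 1 < c := by omega
      have hnd : ¬ c ∣ (k + 1) := by
        intro h; exact absurd (Nat.le_of_dvd (by omega) h) (by omega)
      rw [if_neg (fun h => hnd (hiff.mp h))]
      rw [ih (k + 1) (acc ++ [idxI n d k + 1]) hklt (by omega)]
      have hck : c - k = (c - (k + 1)) + 1 := by omega
      rw [hck, List.range_succ_eq_map]
      simp only [List.map_cons, List.map_map, List.append_assoc, List.cons_append,
        List.nil_append, Nat.add_zero]
      congr 1
      congr 1
      apply List.map_congr_left
      intro j _
      simp only [Function.comp_apply]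
      rw [show k + Nat.succ j = k + 1 + j by omega]

-- ===== VERDICT (by name: the statement is the Claim_ definition above) =====
theorem func_spec : Claim_equal_func := by
  unfold Claim_equal_func Spec_func
  intro n m _ hpre
  have hn : 0 < n := hpre
  unfold func func_alt
  simp only
  set d := PySem.Int.mod (m - 1) n with hd
  have hd0 : 0 ≤ d := by rw [hd, PySem.Int.mod_eq_emod_of_pos hn]; exact Int.emod_nonneg _ (by omega)
  set N := n.toNat with hN
  set D := d.toNat with hD
  set G := Nat.gcd N D with hG
  set c := N / G with hc
  have hGpos : 0 < G := Nat.gcd_pos_of_pos_left D (by omega)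
  have hcpos : 0 < c := Nat.div_pos (Nat.le_of_dvd (by omega) (Nat.gcd_dvd_left N D)) hGpos
  have hcle : c ≤ N := Nat.div_le_self N G
  -- the gcd loop computes G
  have hgcd : gcdLoop n d (d.natAbs + 1) = (G : Int) := by
    rw [gcdLoop_eq (d.natAbs + 1) n d hn hd0 (by omega)]
    unfold Int.gcd
    rw [show n.natAbs = N by omega, show d.natAbs = D by omega]
  -- the count is c
  have hcount : PySem.Int.floordiv n (gcdLoop n d (d.natAbs + 1)) = ((c : Nat) : Int) := by
    rw [hgcd, PySem.Int.floordiv_eq_ediv_of_pos (by exact_mod_cast hGpos),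
        show n = ((N : Nat) : Int) by omega, hc]
    push_cast
    ring
  rw [hcount]
  -- the A-side loop result
  have hloop := funcLoop_spec n m hn (n.toNat + 1) 0 [] hcpos
    (le_trans (Nat.sub_le _ _) (le_trans (Nat.div_le_self _ _) (Nat.le_succ _)))
  rw [show idxI n d 0 = 0 by simp [idxI]] at hloop
  rw [hloop]
  -- both are joins of the same list of digit strings
  rw [PySem.List.pyRange_zero_natCast c]
  simp only [List.nil_append, List.map_map, Nat.sub_zero, Nat.zero_add]
  congr 1
  apply List.map_congr_left
  intro j _
  simp only [Function.comp_apply, idxI, PySem.Int.mod_eq_emod_of_pos hn, emod_mulr]
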